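-- pv_equiv track=rewrite | github.com/danielxrodas/JARVIS | commands/utilities.py | convert_text_to_comments
-- ===== SOURCE A (Python) =====
-- def convert_text_to_comments(ai_output: str) -> str:
--     """
--     Converts explanatory text outside of ```python``` code blocks
--     into Python comments.
--     """
--     result_lines = []
--     in_code_block = False
--     for line in ai_output.splitlines():
--         if line.strip().startswith("```"):
--             in_code_block = not in_code_block
--             # Only include ```python``` if code block starts
--             if in_code_block:
--                 continue
--             else:
--                 continue  # skip closing ```
--         if in_code_block:
--             result_lines.append(line)
--         else:
--             if line.strip() == "":
--                 result_lines.append("")  # keep empty lines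
--             else:
--                 result_lines.append(f"# {line}")
--     return "\n".join(result_lines)
-- ===== SOURCE B (Python) =====
-- def _is_fence(line: str) -> bool:
--     return line.strip().startswith("```")
--
--
-- def _comment(line: str) -> str:
--     return "" if line.strip() == "" else "# " + line
--
--
-- def convert_text_to_comments(ai_output: str) -> str:
--     # Partition the lines into fence-delimited segments and map each segment
--     # as a unit: comment-mode segments get commented, code-mode segments are
--     # copied verbatim; fence lines themselves are dropped.
--     lines = ai_output.splitlines()
--     out = []
--     comment_mode = True
--     i = 0
--     n = len(lines)
--     while i < n:
--         j = i
--         while j < n and not _is_fence(lines[j]):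
--             j += 1
--         seg = lines[i:j]
--         if comment_mode:
--             out.extend(_comment(ln) for ln in seg)
--         else:
--             out.extend(seg)
--         comment_mode = not comment_mode
--         i = j + 1
--     return "\n".join(out)
-- ===== Notes on version B (the rewrite author's own statement) =====
-- stated objective: alternative
-- what changed: Replaced the per-line boolean state machine with a partition-then-map structure: scan to the next fence line, slice out the whole segment, and map comment-mode segments / copy code-mode segments as units.
import Mathlib
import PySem

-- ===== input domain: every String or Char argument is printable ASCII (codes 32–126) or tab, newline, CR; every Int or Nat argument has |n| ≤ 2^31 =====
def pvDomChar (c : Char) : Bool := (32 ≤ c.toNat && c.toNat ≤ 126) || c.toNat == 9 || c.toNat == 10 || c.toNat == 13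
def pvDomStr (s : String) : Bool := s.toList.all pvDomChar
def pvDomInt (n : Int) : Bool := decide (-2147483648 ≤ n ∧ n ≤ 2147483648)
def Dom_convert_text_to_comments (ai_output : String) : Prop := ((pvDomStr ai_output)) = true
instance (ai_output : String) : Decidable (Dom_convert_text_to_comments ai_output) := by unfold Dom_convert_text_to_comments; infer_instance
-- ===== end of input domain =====

-- B partitions the lines into fence-delimited segments and maps each segment as a unit,
-- instead of A's per-line boolean state machine (objective: alternative decomposition).


-- ===== PORT A =====
-- A : per-line loop with boolean state `in_code_block` and accumulator `result_lines`
def convTTC_goA : List (List Char) → Bool → List (List Char) → List (List Char)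
  | [], _, acc => acc
  | l :: rest, inCode, acc =>
    if PySem.Chars.startswith (PySem.Chars.strip l) ['`', '`', '`'] then
      convTTC_goA rest (!inCode) acc
    else if inCode then
      convTTC_goA rest inCode (acc ++ [l])
    else if PySem.Chars.strip l = [] then
      convTTC_goA rest inCode (acc ++ [[]])
    else
      convTTC_goA rest inCode (acc ++ ['#' :: ' ' :: l])

def convert_text_to_comments (ai_output : String) : String :=
  String.ofList (PySem.Chars.join ['\n'] (convTTC_goA (PySem.Chars.splitlines ai_output.toList) false []))

-- ===== PORT B =====
def convTTC_isFence (l : List Char) : Bool :=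
  PySem.Chars.startswith (PySem.Chars.strip l) ['`', '`', '`']

def convTTC_cmt (l : List Char) : List Char :=
  if PySem.Chars.strip l = [] then [] else '#' :: ' ' :: l

-- B : split off the segment up to the next fence, map it as a unit, recurse past the fence
def convTTC_goB (mode : Bool) (lines : List (List Char)) : List (List Char) :=
  let seg := lines.takeWhile (fun l => !convTTC_isFence l)
  let mapped := if mode then seg.map convTTC_cmt else seg
  match h : lines.dropWhile (fun l => !convTTC_isFence l) with
  | [] => mapped
  | _ :: rest =>
      mapped ++ convTTC_goB (!mode) rest
termination_by lines.length
decreasing_by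
  have h1 : (lines.dropWhile (fun l => !convTTC_isFence l)).length ≤ lines.length :=
    List.length_dropWhile_le _ _
  simp [h] at h1
  omega

def convert_text_to_comments_alt (ai_output : String) : String :=
  String.ofList (PySem.Chars.join ['\n'] (convTTC_goB true (PySem.Chars.splitlines ai_output.toList)))

-- ===== PRECONDITION & SPEC =====
def Spec_convert_text_to_comments (ai_output : String) (out : String) : Prop := out = convert_text_to_comments_alt ai_output
instance (ai_output : String) (out : String) : Decidable (Spec_convert_text_to_comments ai_output out) := by unfold Spec_convert_text_to_comments; infer_instance

-- ===== CLAIM (what is proved, stated in full; the proofs are below) =====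
def Claim_equal_convert_text_to_comments : Prop := ∀ (ai_output : String), Dom_convert_text_to_comments ai_output → Spec_convert_text_to_comments ai_output (convert_text_to_comments ai_output)

-- ===== LEMMAS AND PROOFS =====

lemma convTTC_goB_nil (mode : Bool) : convTTC_goB mode [] = [] := by
  rw [convTTC_goB]; simp

lemma convTTC_goB_cons_fence (mode : Bool) (l : List Char) (rest : List (List Char))
    (hf : convTTC_isFence l = true) :
    convTTC_goB mode (l :: rest) = convTTC_goB (!mode) rest := by
  have hdw : List.dropWhile (fun l => !convTTC_isFence l) (l :: rest) = l :: rest := by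
    simp [List.dropWhile_cons, hf]
  rw [convTTC_goB]
  simp only [List.takeWhile_cons, hf, Bool.not_true]
  split
  · rename_i heq
    rw [hdw] at heq; cases heq
  · rename_i x xs heq
    rw [hdw] at heq
    cases heq
    cases mode <;> simp

lemma convTTC_goB_cons_nonfence (mode : Bool) (l : List Char) (rest : List (List Char))
    (hf : convTTC_isFence l = false) :
    convTTC_goB mode (l :: rest) =
      (if mode then convTTC_cmt l else l) :: convTTC_goB mode rest := by
  have hdw : List.dropWhile (fun l => !convTTC_isFence l) (l :: rest) =
      List.dropWhile (fun l => !convTTC_isFence l) rest := by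
    simp [List.dropWhile_cons, hf]
  cases mode with
  | false =>
    rw [convTTC_goB, convTTC_goB]
    simp only [List.takeWhile_cons, hf, Bool.not_false, if_true, Bool.false_eq_true, if_false]
    split
    next h1 =>
      rw [hdw] at h1
      split
      next h3 => rfl
      next x xs h3 => rw [h1] at h3; cases h3
    next x xs h1 =>
      rw [hdw] at h1
      split
      next h3 => rw [h1] at h3; cases h3
      next y ys h3 =>
        rw [h1] at h3
        injection h3 with h4 h5
        subst h4; subst h5
        simp
  | true =>
    rw [convTTC_goB, convTTC_goB]
    simp only [List.takeWhile_cons, hf, Bool.not_false, if_true, List.map_cons]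
    split
    next h1 =>
      rw [hdw] at h1
      split
      next h3 => rfl
      next x xs h3 => rw [h1] at h3; cases h3
    next x xs h1 =>
      rw [hdw] at h1
      split
      next h3 => rw [h1] at h3; cases h3
      next y ys h3 =>
        rw [h1] at h3
        injection h3 with h4 h5
        subst h4; subst h5
        simp

lemma convTTC_goA_eq (lines : List (List Char)) (inCode : Bool) (acc : List (List Char)) :
    convTTC_goA lines inCode acc = acc ++ convTTC_goB (!inCode) lines := by
  induction lines generalizing inCode acc with
  | nil => simp [convTTC_goA, convTTC_goB_nil]
  | cons l rest ih =>
    by_cases hf : convTTC_isFence l = true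
    · rw [convTTC_goB_cons_fence _ _ _ hf]
      unfold convTTC_goA
      rw [show PySem.Chars.startswith (PySem.Chars.strip l) ['`', '`', '`'] = true from hf]
      simp only [if_true]
      rw [ih]
    · rw [convTTC_goB_cons_nonfence _ _ _ (by simpa using hf)]
      unfold convTTC_goA
      rw [show PySem.Chars.startswith (PySem.Chars.strip l) ['`', '`', '`'] = false from by simpa using hf]
      simp only [Bool.false_eq_true, if_false]
      cases inCode with
      | false =>
        simp only [Bool.not_false, if_true]
        by_cases hs : PySem.Chars.strip l = []
        · rw [if_pos hs]
          rw [ih false (acc ++ [[]])]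
          simp [convTTC_cmt, hs]
        · rw [if_neg hs]
          rw [ih false (acc ++ ['#' :: ' ' :: l])]
          simp [convTTC_cmt, hs]
      | true =>
        simp only [Bool.not_true, if_false]
        rw [ih]
        simp

-- ===== VERDICT (by name: the statement is the Claim_ definition above) =====
theorem convert_text_to_comments_spec : Claim_equal_convert_text_to_comments := by
  intro ai_output _
  unfold Spec_convert_text_to_comments convert_text_to_comments convert_text_to_comments_alt
  rw [convTTC_goA_eq]
  simp
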